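-- pv_equiv track=rewrite | github.com/Sebastion-Vigil/lambda-archive-whiteboard-etc | Random/mex.py | mexFunction
-- ===== SOURCE A (Python) =====
-- def mexFunction(s, upper_bound):
--     found = -1
--     for i in range(upper_bound):
--         if not i in s:
--             found = i
--             break
--     else:
--         return upper_bound
--     return found
-- ===== SOURCE B (Python) =====
-- def mexFunction(s, upper_bound):
--     cand = 0
--     for v in sorted(set(s)):
--         if v < cand:
--             continue
--         if v == cand:
--             cand += 1
--         else:
--             break
--     return min(cand, upper_bound)
-- ===== Notes on version B (the rewrite author's own statement) =====
-- stated objective: faster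
-- what changed: Instead of testing each candidate 0..upper_bound-1 for membership in s (a linear scan per candidate), B deduplicates s into a set, sorts it once, and walks a candidate counter along the sorted values, returning min(candidate, upper_bound).
import Mathlib
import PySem

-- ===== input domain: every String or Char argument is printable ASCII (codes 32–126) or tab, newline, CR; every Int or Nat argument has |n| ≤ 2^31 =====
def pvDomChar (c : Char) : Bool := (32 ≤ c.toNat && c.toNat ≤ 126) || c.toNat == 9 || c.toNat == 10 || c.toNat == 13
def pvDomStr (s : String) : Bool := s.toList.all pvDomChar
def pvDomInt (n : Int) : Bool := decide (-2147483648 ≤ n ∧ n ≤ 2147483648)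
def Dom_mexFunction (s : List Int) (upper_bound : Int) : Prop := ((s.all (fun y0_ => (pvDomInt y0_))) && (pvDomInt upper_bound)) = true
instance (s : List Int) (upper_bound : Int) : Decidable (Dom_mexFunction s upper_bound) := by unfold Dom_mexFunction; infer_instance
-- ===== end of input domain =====

-- B replaces A's per-candidate membership scan over range(upper_bound) with one sort of the
-- deduplicated elements and a single walk of a candidate counter (faster in a timing run).


-- ===== PORT A =====
-- the for/else loop: first i in the range with i ∉ s (break), none = the else branch
def mexLoopA (s : List Int) : List Int → Option Int
  | [] => none
  | i :: rest => if i ∈ s then mexLoopA s rest else some i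

def mexFunction (s : List Int) (upper_bound : Int) : Int :=
  match mexLoopA s (PySem.List.pyRange 0 upper_bound 1) with
  | some found => found
  | none => upper_bound

-- ===== PORT B =====
-- the walk over sorted(set(s)): skip v < cand, bump on v == cand, break on v > cand
def mexWalk (cand : Int) : List Int → Int
  | [] => cand
  | v :: rest => if v < cand then mexWalk cand rest
                 else if v = cand then mexWalk (cand + 1) rest
                 else cand

def mexFunction_alt (s : List Int) (upper_bound : Int) : Int :=
  min (mexWalk 0 (PySem.List.sorted (PySem.Set.ofList s) (fun x => x) false)) upper_bound

-- ===== PRECONDITION & SPEC =====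
def Spec_mexFunction (s : List Int) (upper_bound : Int) (out : Int) : Prop := out = mexFunction_alt s upper_bound
instance (s : List Int) (upper_bound : Int) (out : Int) : Decidable (Spec_mexFunction s upper_bound out) := by unfold Spec_mexFunction; infer_instance

-- ===== CLAIM (what is proved, stated in full; the proofs are below) =====
def Claim_equal_mexFunction : Prop := ∀ (s : List Int) (upper_bound : Int), Dom_mexFunction s upper_bound → Spec_mexFunction s upper_bound (mexFunction s upper_bound)

-- ===== LEMMAS AND PROOFS =====

-- mexWalk on a strictly increasing list computes: result m with cand ≤ m, m ∉ L,
-- and every k with cand ≤ k < m is in L.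
theorem mexWalk_spec (L : List Int) (cand : Int) (hL : L.Pairwise (· < ·)) :
    cand ≤ mexWalk cand L ∧ mexWalk cand L ∉ L ∧
      (∀ k : Int, cand ≤ k → k < mexWalk cand L → k ∈ L) := by
  induction L generalizing cand with
  | nil =>
    refine ⟨le_refl _, by simp [mexWalk], ?_⟩
    intro k h1 h2; simp [mexWalk] at h2; omega
  | cons v rest ih =>
    have hrest : rest.Pairwise (· < ·) := (List.pairwise_cons.mp hL).2
    have hvall : ∀ y ∈ rest, v < y := (List.pairwise_cons.mp hL).1
    by_cases h1 : v < cand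
    · have ⟨a, b, c⟩ := ih cand hrest
      refine ⟨by simpa [mexWalk, h1] using a, ?_, ?_⟩
      · simp only [mexWalk, if_pos h1, List.mem_cons]
        rintro (h | h)
        · omega
        · exact b h
      · intro k hk1 hk2
        simp only [mexWalk, if_pos h1] at hk2
        exact List.mem_cons_of_mem _ (c k hk1 hk2)
    · by_cases h2 : v = cand
      · have ⟨a, b, c⟩ := ih (cand + 1) hrest
        refine ⟨?_, ?_, ?_⟩
        · simp only [mexWalk, if_neg h1, if_pos h2]; omega
        · simp only [mexWalk, if_neg h1, if_pos h2, List.mem_cons]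
          rintro (h | h)
          · omega
          · exact b h
        · intro k hk1 hk2
          simp only [mexWalk, if_neg h1, if_pos h2] at hk2
          by_cases hk : k = cand
          · simp [hk, h2]
          · exact List.mem_cons_of_mem _ (c k (by omega) hk2)
      · refine ⟨?_, ?_, ?_⟩
        · simp [mexWalk, h1, h2]
        · simp only [mexWalk, if_neg h1, if_neg h2, List.mem_cons]
          rintro (h | h)
          · omega
          · have := hvall _ h; omega
        · intro k hk1 hk2
          simp only [mexWalk, if_neg h1, if_neg h2] at hk2
          omega

-- A's loop over a consecutive range, characterized by the mex m of s
theorem mexLoopA_char (s : List Int) (m : Int) (hm : m ∉ s)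
    (hbelow : ∀ k : Int, 0 ≤ k → k < m → k ∈ s) :
    ∀ a b : Int, 0 ≤ a → a ≤ m →
      mexLoopA s (PySem.List.pyRange a b 1) = if m < b then some m else none := by
  intro a b
  by_cases hab : a < b
  · have hfuel : (b - a).toNat ≠ 0 := by omega
    generalize hn : (b - a).toNat = n
    induction n generalizing a with
    | zero => omega
    | succ n ihn =>
      intro ha ham
      rw [PySem.List.pyRange_one_cons hab]
      by_cases hacand : a = m
      · subst hacand
        simp [mexLoopA, hm, hab]
      · have hamem : a ∈ s := hbelow a ha (by omega)
        simp only [mexLoopA, if_pos hamem]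
        by_cases hab' : a + 1 < b
        · exact ihn (a + 1) hab' (by omega) (by omega) (by omega) (by omega)
        · have : b = a + 1 := by omega
          rw [this, PySem.List.pyRange_one_eq_nil (by omega)]
          simp [mexLoopA]; omega
  · rw [PySem.List.pyRange_one_eq_nil (by omega)]
    intro ha ham
    simp [mexLoopA]; omega

-- ===== VERDICT (by name: the statement is the Claim_ definition above) =====
theorem mexFunction_spec : Claim_equal_mexFunction := by
  intro s ub _
  unfold Spec_mexFunction mexFunction mexFunction_alt
  set L := PySem.List.sorted (PySem.Set.ofList s) (fun x => x) false with hLdef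
  have hLpair : L.Pairwise (· < ·) := PySem.List.sorted_ofList_pairwise_lt s
  have hmemL : ∀ x : Int, x ∈ L ↔ x ∈ s := by
    intro x
    rw [hLdef, PySem.List.mem_sorted, PySem.Set.mem_ofList]
  obtain ⟨hge, hnot, hall⟩ := mexWalk_spec L 0 hLpair
  set m := mexWalk 0 L with hmdef
  have hm : m ∉ s := fun h => hnot ((hmemL m).mpr h)
  have hbelow : ∀ k : Int, 0 ≤ k → k < m → k ∈ s := fun k h1 h2 =>
    (hmemL k).mp (hall k h1 h2)
  rw [mexLoopA_char s m hm hbelow 0 ub (by omega) hge]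
  by_cases h : m < ub
  · simp [h]; omega
  · simp [h]; omega
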